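-- pv_equiv track=rewrite | github.com/hyeinhyun/alg_prac | boj/10844.py | solution
-- ===== SOURCE A (Python) =====
-- def solution(num):
--     if num==1:
--         return 9
--
--     else:
--         n=[0,1,1,1,1,1,1,1,1,1]
--         for i in range(num-1):
--             temp=[n[1],n[0]+n[2],n[1]+n[3],n[2]+n[4],n[3]+n[5],n[4]+n[6],n[5]+n[7],n[6]+n[8],n[7]+n[9],n[8]]
--             n=temp
--         return sum(n)%1000000000
-- ===== SOURCE B (Python) =====
-- _M = 1000000000
--
--
-- def _mat_mult(X, Y):
--     return [[sum(X[i][k] * Y[k][j] for k in range(10)) % _M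
--              for j in range(10)] for i in range(10)]
--
--
-- def solution(num):
--     if num == 1:
--         return 9
--     T = [[1 if abs(i - j) == 1 else 0 for j in range(10)] for i in range(10)]
--     P = [[1 if i == j else 0 for j in range(10)] for i in range(10)]
--     e = num - 1
--     while e > 0:
--         if e % 2 == 1:
--             P = _mat_mult(P, T)
--         T = _mat_mult(T, T)
--         e //= 2
--     return sum(sum(P[i]) for i in range(1, 10)) % _M
-- ===== Notes on version B (the rewrite author's own statement) =====
-- stated objective: faster
-- what changed: A iterates the ten-digit staircase DP num-1 times on ever-growing exact integers, taking the modulus only at the end; B instead raises the ten-by-ten tridiagonal transition matrix to the (num-1)-th power by binary exponentiation with reduction mod 1e9 at every multiplication and sums the matrix rows for the nonzero leading digits.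
import Mathlib
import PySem

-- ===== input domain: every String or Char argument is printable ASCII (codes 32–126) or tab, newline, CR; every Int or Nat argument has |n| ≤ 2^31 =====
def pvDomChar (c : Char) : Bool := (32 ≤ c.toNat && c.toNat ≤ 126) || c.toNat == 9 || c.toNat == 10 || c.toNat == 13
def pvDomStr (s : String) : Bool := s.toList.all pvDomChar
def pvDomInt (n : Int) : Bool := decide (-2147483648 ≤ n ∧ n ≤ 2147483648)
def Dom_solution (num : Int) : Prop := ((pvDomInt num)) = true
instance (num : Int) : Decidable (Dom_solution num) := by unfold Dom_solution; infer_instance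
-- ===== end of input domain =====

-- B replaces A's step-by-step DP (num-1 iterations of the 10-digit recurrence, mod taken
-- only at the end) by binary exponentiation of the 10×10 tridiagonal transition matrix
-- with modular reduction at every multiplication (objective: faster).

-- ===== PORT A =====
-- n[i] on the always-length-10 state list (index always in range in A)
def pvG1 (n : List Int) (i : Int) : Int := (PySem.List.pyGet? n i).getD 0

def pvStepA (n : List Int) : List Int :=
  [pvG1 n 1, pvG1 n 0 + pvG1 n 2, pvG1 n 1 + pvG1 n 3, pvG1 n 2 + pvG1 n 4,
   pvG1 n 3 + pvG1 n 5, pvG1 n 4 + pvG1 n 6, pvG1 n 5 + pvG1 n 7,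
   pvG1 n 6 + pvG1 n 8, pvG1 n 7 + pvG1 n 9, pvG1 n 8]

def solution (num : Int) : Int :=
  if num = 1 then 9
  else
    let n := (PySem.List.pyRange 0 (num - 1) 1).foldl (fun n _ => pvStepA n)
               [0, 1, 1, 1, 1, 1, 1, 1, 1, 1]
    PySem.Int.mod (n.foldl (· + ·) 0) 1000000000

-- ===== PORT B =====
def pvM : Int := 1000000000

-- X[i][j] (indices always in range in B)
def pvEnt (X : List (List Int)) (i j : Int) : Int :=
  (PySem.List.pyGet? ((PySem.List.pyGet? X i).getD []) j).getD 0

def pvMatMult (X Y : List (List Int)) : List (List Int) :=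
  (PySem.List.pyRange 0 10 1).map (fun i =>
    (PySem.List.pyRange 0 10 1).map (fun j =>
      PySem.Int.mod ((PySem.List.pyRange 0 10 1).foldl
        (fun s k => s + pvEnt X i k * pvEnt Y k j) 0) pvM))

-- the while-loop of B: repeated squaring
def pvPowLoop (P T : List (List Int)) (e : Int) : List (List Int) :=
  if 0 < e then
    pvPowLoop (if PySem.Int.mod e 2 = 1 then pvMatMult P T else P)
      (pvMatMult T T) (PySem.Int.floordiv e 2)
  else P
termination_by e.toNat
decreasing_by
  rw [PySem.Int.floordiv_eq_ediv_of_pos (by omega)]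
  omega

def solution_alt (num : Int) : Int :=
  if num = 1 then 9
  else
    let T := (PySem.List.pyRange 0 10 1).map (fun i =>
      (PySem.List.pyRange 0 10 1).map (fun j => if (i - j).natAbs = 1 then 1 else 0))
    let P0 := (PySem.List.pyRange 0 10 1).map (fun i =>
      (PySem.List.pyRange 0 10 1).map (fun j => if i = j then 1 else 0))
    let P := pvPowLoop P0 T (num - 1)
    PySem.Int.mod ((PySem.List.pyRange 1 10 1).foldl
      (fun s i => s + ((PySem.List.pyGet? P i).getD []).foldl (· + ·) 0) 0) pvM

-- ===== PRECONDITION & SPEC =====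
def Spec_solution (num : Int) (out : Int) : Prop := out = solution_alt num
instance (num : Int) (out : Int) : Decidable (Spec_solution num out) := by unfold Spec_solution; infer_instance

-- ===== CLAIM (what is proved, stated in full; the proofs are below) =====
def Claim_equal_solution : Prop := ∀ (num : Int), Dom_solution num → Spec_solution num (solution num)

-- ===== LEMMAS AND PROOFS =====

def pvToMat (X : List (List Int)) : Matrix (Fin 10) (Fin 10) (ZMod 1000000000) :=
  Matrix.of fun i j => ((pvEnt X (i.val : Int) (j.val : Int) : Int) : ZMod 1000000000)
theorem pvRange10 : PySem.List.pyRange 0 10 1 = [0,1,2,3,4,5,6,7,8,9] := by decide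
theorem pvRange19 : PySem.List.pyRange 1 10 1 = [1,2,3,4,5,6,7,8,9] := by decide
theorem pvCastMod (a : Int) :
    ((a % (1000000000 : Int) : Int) : ZMod 1000000000) = (a : ZMod 1000000000) := by
  have h : (1000000000 : ZMod 1000000000) = 0 := by
    have := ZMod.natCast_self 1000000000
    norm_num at this
    exact this
  conv_rhs => rw [← Int.emod_add_mul_ediv a 1000000000]
  push_cast
  rw [h]; ring
theorem pvSum10 {M : Type} [AddCommMonoid M] (f : Fin 10 → M) :
    (∑ i, f i) = f 0 + (f 1 + (f 2 + (f 3 + (f 4 + (f 5 + (f 6 + (f 7 + (f 8 + f 9)))))))) := by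
  simp [Fin.sum_univ_succ]
theorem pvGetElemMapRange10 {α : Type} (f : Int → α) (k : Nat) (h : k < 10) :
    ((PySem.List.pyRange 0 10 1).map f)[k]? = some (f (k : Int)) := by
  have := PySem.List.getElem?_map_pyRange_zero f 10 k h
  norm_num at this ⊢
  exact this

theorem pvEnt_mapmap (g : Int → Int → Int) (i j : Fin 10) :
    pvEnt ((PySem.List.pyRange 0 10 1).map (fun a =>
      (PySem.List.pyRange 0 10 1).map (fun b => g a b))) (i.val : Int) (j.val : Int)
      = g (i.val : Int) (j.val : Int) := by
  unfold pvEnt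
  rw [PySem.List.pyGet?_natCast, PySem.List.pyGet?_natCast]
  rw [pvGetElemMapRange10 _ i.val i.isLt]
  simp only [Option.getD_some]
  rw [pvGetElemMapRange10 _ j.val j.isLt]
  rfl
theorem pvToMat_mult (X Y : List (List Int)) :
    pvToMat (pvMatMult X Y) = pvToMat X * pvToMat Y := by
  ext i j
  show ((pvEnt (pvMatMult X Y) (i.val : Int) (j.val : Int) : Int) : ZMod 1000000000) = _
  rw [pvMatMult, pvEnt_mapmap]
  rw [PySem.Int.mod_eq_emod_of_pos (by norm_num [pvM]), show pvM = (1000000000:Int) from rfl, pvCastMod]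
  rw [pvRange10]
  simp only [List.foldl]
  push_cast
  rw [Matrix.mul_apply, pvSum10]
  simp only [pvToMat, Matrix.of_apply]
  norm_num
  ring

theorem pvPowLoop_sem (P T : List (List Int)) (e : Int) :
    pvToMat (pvPowLoop P T e) = pvToMat P * (pvToMat T) ^ e.toNat := by
  induction P, T, e using pvPowLoop.induct with
  | case2 P T e h =>
    rw [pvPowLoop, if_neg h]
    have : e.toNat = 0 := by omega
    rw [this, pow_zero, mul_one]
  | case1 P T e h ih =>
    rw [pvPowLoop, if_pos h]
    simp only [dite_eq_ite] at ih
    rw [ih]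
    have h2 : (0:Int) < 2 := by omega
    rw [PySem.Int.floordiv_eq_ediv_of_pos h2, PySem.Int.mod_eq_emod_of_pos h2]
    have hq : (e / 2).toNat = e.toNat / 2 := by omega
    by_cases hr : e % 2 = 1
    · rw [if_pos hr, pvToMat_mult, pvToMat_mult, hq, mul_assoc, ← sq, ← pow_mul,
        ← pow_succ', show 2 * (e.toNat / 2) + 1 = e.toNat from by omega]
    · rw [if_neg hr, pvToMat_mult, hq, ← sq, ← pow_mul,
        show 2 * (e.toNat / 2) = e.toNat from by omega]
def pvV (n : List Int) : Fin 10 → ZMod 1000000000 :=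
  fun i => ((pvG1 n (i.val : Int) : Int) : ZMod 1000000000)
def pvTL : List (List Int) :=
  (PySem.List.pyRange 0 10 1).map (fun i =>
    (PySem.List.pyRange 0 10 1).map (fun j => if (i - j).natAbs = 1 then 1 else 0))
def pvP0 : List (List Int) :=
  (PySem.List.pyRange 0 10 1).map (fun i =>
    (PySem.List.pyRange 0 10 1).map (fun j => if i = j then 1 else 0))

theorem pvToMat_P0 : pvToMat pvP0 = 1 := by
  ext i j
  show ((pvEnt pvP0 (i.val : Int) (j.val : Int) : Int) : ZMod 1000000000) = _
  rw [pvP0, pvEnt_mapmap, Matrix.one_apply]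
  by_cases hij : i = j
  · simp [hij]
  · have : (i.val : Int) ≠ (j.val : Int) := by
      simp [Fin.val_injective.ne_iff.mpr hij]
    simp [this, hij]

theorem pvStep_sem (n : List Int) :
    pvV (pvStepA n) = Matrix.vecMul (pvV n) (pvToMat pvTL) := by
  funext j
  have hent : ∀ (a b : Fin 10), pvToMat pvTL a b
      = (((if ((a.val : Int) - (b.val : Int)).natAbs = 1 then (1:Int) else 0) : Int) : ZMod 1000000000) := by
    intro a b
    show ((pvEnt pvTL (a.val : Int) (b.val : Int) : Int) : ZMod 1000000000) = _
    rw [pvTL, pvEnt_mapmap]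
  rw [Matrix.vecMul, dotProduct, pvSum10]
  simp only [hent, pvV]
  fin_cases j <;>
    · simp only [pvStepA, pvG1]
      norm_num [PySem.List.pyGet?_of_nonneg]
      try simp
      try (push_cast; ring)
def pvGood (X : List (List Int)) : Prop := X.length = 10 ∧ ∀ r ∈ X, r.length = 10

theorem pvGood_mapmap (g : Int → Int → Int) :
    pvGood ((PySem.List.pyRange 0 10 1).map (fun a =>
      (PySem.List.pyRange 0 10 1).map (fun b => g a b))) := by
  constructor
  · rw [pvRange10]; rfl
  · intro r hr
    rw [List.mem_map] at hr
    obtain ⟨a, _, rfl⟩ := hr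
    rw [pvRange10]; rfl

theorem pvGood_mult (X Y : List (List Int)) : pvGood (pvMatMult X Y) :=
  pvGood_mapmap _

theorem pvGood_powLoop (P T : List (List Int)) (e : Int) :
    pvGood P → pvGood (pvPowLoop P T e) := by
  induction P, T, e using pvPowLoop.induct with
  | case2 P T e h => intro hP; rw [pvPowLoop, if_neg h]; exact hP
  | case1 P T e h ih =>
    intro hP
    rw [pvPowLoop, if_pos h]
    simp only [dite_eq_ite] at ih
    apply ih
    split_ifs
    · exact pvGood_mult P T
    · exact hP

theorem pvList10 (r : List Int) (h : r.length = 10) :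
    ∃ a0 a1 a2 a3 a4 a5 a6 a7 a8 a9 : Int,
      r = [a0, a1, a2, a3, a4, a5, a6, a7, a8, a9] := by
  rcases r with _|⟨a0,_|⟨a1,_|⟨a2,_|⟨a3,_|⟨a4,_|⟨a5,_|⟨a6,_|⟨a7,_|⟨a8,_|⟨a9,t⟩⟩⟩⟩⟩⟩⟩⟩⟩⟩ <;>
    simp_all
theorem pvRowSum (X : List (List Int)) (hX : pvGood X) (i : Fin 10) :
    ((((PySem.List.pyGet? X ((i.val : Nat) : Int)).getD []).foldl (· + ·) 0 : Int) : ZMod 1000000000)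
      = ∑ j : Fin 10, pvToMat X i j := by
  have hi : i.val < X.length := by rw [hX.1]; exact i.isLt
  have hget : PySem.List.pyGet? X ((i.val : Nat) : Int) = some X[i.val] := by
    rw [PySem.List.pyGet?_natCast]; exact List.getElem?_eq_getElem hi
  obtain ⟨a0,a1,a2,a3,a4,a5,a6,a7,a8,a9,hr⟩ :=
    pvList10 X[i.val] (hX.2 _ (List.getElem_mem hi))
  have hent : ∀ j : Fin 10, pvToMat X i j
      = ((pvG1 [a0,a1,a2,a3,a4,a5,a6,a7,a8,a9] ((j.val : Nat) : Int) : Int) : ZMod 1000000000) := by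
    intro j
    show ((pvEnt X _ _ : Int) : ZMod 1000000000) = _
    unfold pvEnt pvG1
    rw [hget]
    simp only [Option.getD_some, hr]
  rw [hget]
  simp only [Option.getD_some, hr]
  rw [pvSum10]
  simp only [hent]
  simp only [pvG1]
  norm_num [PySem.List.pyGet?_of_nonneg]
  try simp
  try (push_cast; ring)

theorem pvSumList (a0 a1 a2 a3 a4 a5 a6 a7 a8 a9 : Int) :
    ((([a0,a1,a2,a3,a4,a5,a6,a7,a8,a9].foldl (· + ·) 0 : Int)) : ZMod 1000000000)
      = ∑ i : Fin 10, pvV [a0,a1,a2,a3,a4,a5,a6,a7,a8,a9] i := by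
  rw [pvSum10]
  simp only [pvV, pvG1, List.foldl]
  norm_num [PySem.List.pyGet?_of_nonneg]
  try simp
  try (push_cast; ring)

theorem pvFoldlConst {α β : Type} (f : α → α) (l : List β) (a : α) :
    l.foldl (fun x _ => f x) a = f^[l.length] a := by
  induction l generalizing a with
  | nil => rfl
  | cons b t ih => simp [List.foldl, ih, Function.iterate_succ_apply]

theorem pvVecIter (n : List Int) (k : Nat) :
    pvV (pvStepA^[k] n) = Matrix.vecMul (pvV n) ((pvToMat pvTL) ^ k) := by
  induction k with
  | zero => simp [Matrix.vecMul_one]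
  | succ k ih =>
    rw [Function.iterate_succ_apply', pvStep_sem, ih, Matrix.vecMul_vecMul, ← pow_succ]
theorem pvBridge (A : Matrix (Fin 10) (Fin 10) (ZMod 1000000000)) :
    ∑ i, Matrix.vecMul (pvV [0,1,1,1,1,1,1,1,1,1]) A i
      = ((((((((0 + ∑ j, A 1 j) + ∑ j, A 2 j) + ∑ j, A 3 j) + ∑ j, A 4 j)
          + ∑ j, A 5 j) + ∑ j, A 6 j) + ∑ j, A 7 j) + ∑ j, A 8 j) + ∑ j, A 9 j := by
  simp only [Matrix.vecMul, dotProduct, pvSum10]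
  norm_num [pvV, pvG1, PySem.List.pyGet?_of_nonneg]
  try simp
  try (push_cast; ring)

theorem pvModEq (a b : Int) (h : ((a : Int) : ZMod 1000000000) = ((b : Int) : ZMod 1000000000)) :
    PySem.Int.mod a 1000000000 = PySem.Int.mod b 1000000000 := by
  rw [PySem.Int.mod_eq_emod_of_pos (by norm_num), PySem.Int.mod_eq_emod_of_pos (by norm_num)]
  have h2 : a ≡ b [ZMOD (1000000000 : Nat)] := (ZMod.intCast_eq_intCast_iff a b _).mp h
  unfold Int.ModEq at h2
  exact_mod_cast h2

theorem pvSumStep (m : List Int) :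
    (((pvStepA m).foldl (· + ·) 0 : Int) : ZMod 1000000000) = ∑ i : Fin 10, pvV (pvStepA m) i := by
  simp only [pvStepA]
  exact pvSumList _ _ _ _ _ _ _ _ _ _

-- ===== VERDICT (by name: the statement is the Claim_ definition above) =====
theorem solution_spec : Claim_equal_solution := by
  unfold Claim_equal_solution Spec_solution
  intro num _
  by_cases h1 : num = 1
  · subst h1; decide
  · have hA : solution num = PySem.Int.mod
        (((PySem.List.pyRange 0 (num - 1) 1).foldl (fun n _ => pvStepA n)
          [0,1,1,1,1,1,1,1,1,1]).foldl (· + ·) 0) 1000000000 := by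
      rw [solution, if_neg h1]
    have hB : solution_alt num = PySem.Int.mod
        ((PySem.List.pyRange 1 10 1).foldl
          (fun s i => s + ((PySem.List.pyGet? (pvPowLoop pvP0 pvTL (num - 1)) i).getD []).foldl (· + ·) 0) 0) pvM := by
      simp only [solution_alt, if_neg h1]
      rfl
    rw [hA, hB, show pvM = (1000000000 : Int) from rfl]
    by_cases h2 : num < 1
    · rw [PySem.List.pyRange_one_eq_nil (by omega), pvPowLoop, if_neg (by omega)]
      decide
    · have hk : (num - 1).toNat = (num - 2).toNat + 1 := by omega
      apply pvModEq
      rw [pvFoldlConst (f := pvStepA), PySem.List.length_pyRange_one,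
        show num - 1 - 0 = num - 1 from by ring, hk, Function.iterate_succ_apply',
        pvSumStep]
      have hit : pvStepA (pvStepA^[(num - 2).toNat] [0,1,1,1,1,1,1,1,1,1])
          = pvStepA^[(num - 2).toNat + 1] [0,1,1,1,1,1,1,1,1,1] :=
        (Function.iterate_succ_apply' _ _ _).symm
      rw [hit, pvVecIter, pvBridge]
      have hG : pvGood (pvPowLoop pvP0 pvTL (num - 1)) :=
        pvGood_powLoop _ _ _ (by rw [pvP0]; exact pvGood_mapmap _)
      have e1 := pvRowSum _ hG 1
      have e2 := pvRowSum _ hG 2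
      have e3 := pvRowSum _ hG 3
      have e4 := pvRowSum _ hG 4
      have e5 := pvRowSum _ hG 5
      have e6 := pvRowSum _ hG 6
      have e7 := pvRowSum _ hG 7
      have e8 := pvRowSum _ hG 8
      have e9 := pvRowSum _ hG 9
      norm_num at e1 e2 e3 e4 e5 e6 e7 e8 e9
      rw [pvRange19]
      simp only [List.foldl]
      push_cast [e1, e2, e3, e4, e5, e6, e7, e8, e9]
      rw [pvPowLoop_sem, pvToMat_P0, one_mul, hk]
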